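-- pv_equiv track=rewrite | github.com/KNU-HAEDAL/2024-SS-small-group-ALSol | SWKIM/91to100/92.py | solution
-- ===== SOURCE A (Python) =====
-- from itertools import combinations
--
-- def compare(id, banned_id):
--     if len(id) == len(banned_id):
--         for i in range(len(id)):
--             if banned_id[i] != '*' and id[i] != banned_id[i]:
--                 return False
--         return True
--     return False
--
-- def solution(user_id, banned_id):
--     answer = 0
--     size = len(banned_id)
--
--     # 조합으로 제재 아이디와 동일한지 비교
--     combi = list(combinations(user_id, size))
--
--     for people in combi:
--         visited = [False]*size
--
--         # 가능한 모든 경우를 탐색하면서 제재 아이디와 동일한 경우 true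
--         def dfs(idx, visited):
--             if idx == size: # 모든 아이디가 제재 아이디와 같은 경우 true
--                 return True
--
--             result = False
--             user = people[idx]
--
--             # 방문하지 않은 제재 아이디들을 방문
--             for i in range(size):
--                 if not visited[i]:
--                     # 비교를 통해 동일하다면 방문
--                     if compare(user, banned_id[i]):
--                         visited[i] = True
--
--                         if dfs(idx+1, visited):
--                             return True
--                         visited[i] = False
--
--             return False    # 비교를 통해 동일하지 않다면 false
--
--         if dfs(0, visited): # 동일한 경우 +1
--             answer += 1
--
--     return answer
-- ===== SOURCE B (Python) =====
-- from itertools import combinations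
--
-- def solution(user_id, banned_id):
--     k = len(banned_id)
--
--     def fits(uid, pat):
--         return len(uid) == len(pat) and all(p == '*' or c == p for c, p in zip(uid, pat))
--
--     # for each user, the list of banned slots it can occupy
--     compat = [[j for j in range(k) if fits(uid, banned_id[j])] for uid in user_id]
--
--     answer = 0
--     for combo in combinations(compat, k):
--         # forward reachability over sets of occupied-slot states instead of backtracking
--         reach = {(False,) * k}
--         for slots in combo:
--             reach = {r[:j] + (True,) + r[j + 1:] for r in reach for j in slots if not r[j]}
--         if reach:
--             answer += 1
--     return answer
-- ===== Notes on version B (the rewrite author's own statement) =====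
-- stated objective: alternative
-- what changed: Per k-subset, A tries every user-to-pattern assignment by backtracking DFS (worst case k!); B precomputes each user's compatible pattern slots once and decides matchability by forward reachability over sets of occupied-slot states (at most 2^k states).
import Mathlib
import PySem

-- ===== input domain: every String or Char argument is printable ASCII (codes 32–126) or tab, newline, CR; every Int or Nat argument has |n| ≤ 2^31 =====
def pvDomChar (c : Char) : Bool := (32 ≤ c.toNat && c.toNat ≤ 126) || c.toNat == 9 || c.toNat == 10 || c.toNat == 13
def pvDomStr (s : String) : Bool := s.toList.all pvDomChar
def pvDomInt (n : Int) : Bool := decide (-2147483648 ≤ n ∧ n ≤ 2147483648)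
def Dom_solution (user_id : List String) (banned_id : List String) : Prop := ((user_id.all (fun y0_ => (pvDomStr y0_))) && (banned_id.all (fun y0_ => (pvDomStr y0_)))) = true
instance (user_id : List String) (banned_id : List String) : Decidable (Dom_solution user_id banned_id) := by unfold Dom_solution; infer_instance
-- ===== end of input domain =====

-- B replaces A's factorial backtracking assignment per subset by a forward reachability
-- search over sets of occupied-slot states (objective: alternative algorithm).

-- ===== PORT A =====
-- itertools.combinations(xs, k) in index order (shared by both ports)
def pyCombinations {α : Type} : Nat → List α → List (List α)
  | 0, _ => [[]]
  | _ + 1, [] => []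
  | k + 1, x :: xs => (pyCombinations k xs).map (x :: ·) ++ pyCombinations (k + 1) xs

-- compare(id, banned_id): length check, then the index loop with early return False
def compareA (id : String) (banned : String) : Bool :=
  let l1 := id.toList
  let l2 := banned.toList
  if l1.length = l2.length then
    (List.range l1.length).all (fun i => !((l2.getD i ' ' != '*') && (l1.getD i ' ' != l2.getD i ' ')))
  else false

-- dfs(idx, visited): people is consumed positionally (idx → structural recursion);
-- the for-loop with early `return True` is `any`; set/restore of visited[i] is the
-- functional `visited.set i true` passed to the recursive call.
def dfsA (banned : List String) : List String → List Bool → Bool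
  | [], _ => true
  | u :: us, visited =>
      (List.range banned.length).any (fun i =>
        !(visited.getD i true) && compareA u (banned.getD i "") &&
          dfsA banned us (visited.set i true))

def solution (user_id : List String) (banned_id : List String) : Int :=
  let size := banned_id.length
  let combi := pyCombinations size user_id
  combi.foldl (fun answer people =>
    if dfsA banned_id people (List.replicate size false) then answer + 1 else answer) 0

-- ===== PORT B =====
def fitsB (uid : String) (pat : String) : Bool :=
  uid.toList.length == pat.toList.length &&
    (uid.toList.zip pat.toList).all (fun cp => cp.2 == '*' || cp.1 == cp.2)

-- [j for j in range(k) if fits(uid, banned_id[j])]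
def compatB (banned : List String) (k : Nat) (uid : String) : List Nat :=
  (List.range k).filter (fun j => fitsB uid (banned.getD j ""))

-- {r[:j] + (True,) + r[j+1:] for r in reach for j in slots if not r[j]}
def stepB (slots : List Nat) (reach : List (List Bool)) : PySem.Set (List Bool) :=
  PySem.Set.ofList (reach.flatMap (fun r =>
    (slots.filter (fun j => !(r.getD j true))).map (fun j => r.set j true)))

def solution_alt (user_id : List String) (banned_id : List String) : Int :=
  let k := banned_id.length
  let compat := user_id.map (fun uid => compatB banned_id k uid)
  (pyCombinations k compat).foldl (fun answer combo =>
    let reach := combo.foldl (fun reach slots => stepB slots reach)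
      [List.replicate k false]
    if reach.isEmpty then answer else answer + 1) 0

-- ===== PRECONDITION & SPEC =====
def Spec_solution (user_id : List String) (banned_id : List String) (out : Int) : Prop := out = solution_alt user_id banned_id
instance (user_id : List String) (banned_id : List String) (out : Int) : Decidable (Spec_solution user_id banned_id out) := by unfold Spec_solution; infer_instance

-- ===== CLAIM (what is proved, stated in full; the proofs are below) =====
def Claim_equal_solution : Prop := ∀ (user_id : List String) (banned_id : List String), Dom_solution user_id banned_id → Spec_solution user_id banned_id (solution user_id banned_id)

-- ===== LEMMAS AND PROOFS =====

lemma pyCombinations_map {α β : Type} (f : α → β) :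
    ∀ (k : Nat) (xs : List α),
      pyCombinations k (xs.map f) = (pyCombinations k xs).map (List.map f) := by
  intro k xs
  induction xs generalizing k with
  | nil => cases k <;> simp [pyCombinations]
  | cons x xs ih =>
    cases k with
    | zero => simp [pyCombinations]
    | succ k =>
      simp [pyCombinations, ih, List.map_map, Function.comp]

lemma allRange_eq_zip :
    ∀ (l1 l2 : List Char), l1.length = l2.length →
      ((List.range l1.length).all
        (fun i => !((l2.getD i ' ' != '*') && (l1.getD i ' ' != l2.getD i ' '))))
      = (l1.zip l2).all (fun cp => cp.2 == '*' || cp.1 == cp.2) := by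
  intro l1
  induction l1 with
  | nil => intro l2 h; simp
  | cons c l1 ih =>
    intro l2 h
    cases l2 with
    | nil => simp at h
    | cons p l2 =>
      simp only [List.length_cons, List.range_succ_eq_map, List.all_cons, List.all_map,
        Function.comp_def, List.getD_cons_zero, List.getD_cons_succ, List.zip_cons_cons]
      rw [ih l2 (by simpa using h)]
      congr 1
      cases hcp : (p == '*') <;> cases hc : (c == p) <;> simp_all

lemma compareA_eq_fitsB (u p : String) : compareA u p = fitsB u p := by
  unfold compareA fitsB
  by_cases h : u.toList.length = p.toList.length
  · rw [if_pos h, allRange_eq_zip u.toList p.toList h]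
    simp [h]
  · rw [if_neg h]
    have : (u.toList.length == p.toList.length) = false := by simpa using h
    rw [this, Bool.false_and]

lemma mem_stepB (slots : List Nat) (reach : List (List Bool)) (v' : List Bool) :
    v' ∈ stepB slots reach ↔
      ∃ v ∈ reach, ∃ j ∈ slots, (v.getD j true = false) ∧ v' = v.set j true := by
  simp only [stepB, PySem.Set.mem_ofList, List.mem_flatMap, List.mem_map, List.mem_filter]
  constructor
  · rintro ⟨v, hv, j, ⟨hj, hjf⟩, rfl⟩
    exact ⟨v, hv, j, hj, by simpa using hjf, rfl⟩
  · rintro ⟨v, hv, j, hj, hjf, rfl⟩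
    exact ⟨v, hv, j, ⟨hj, by simpa using hjf⟩, rfl⟩

lemma reach_iff (banned : List String) :
    ∀ (us : List String) (reach : List (List Bool)),
      (us.foldl (fun re u => stepB (compatB banned banned.length u) re) reach) ≠ [] ↔
        ∃ v ∈ reach, dfsA banned us v = true := by
  intro us
  induction us with
  | nil =>
    intro reach
    constructor
    · intro h
      obtain ⟨v, hv⟩ := List.exists_mem_of_ne_nil _ h
      exact ⟨v, hv, rfl⟩
    · rintro ⟨v, hv, -⟩
      exact List.ne_nil_of_mem hv
  | cons u us ih =>
    intro reach
    rw [List.foldl_cons, ih]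
    constructor
    · rintro ⟨v', hv', hdfs⟩
      rw [mem_stepB] at hv'
      obtain ⟨v, hv, j, hj, hfree, rfl⟩ := hv'
      rw [compatB, List.mem_filter, List.mem_range] at hj
      refine ⟨v, hv, ?_⟩
      simp only [dfsA, List.any_eq_true, List.mem_range, Bool.and_eq_true, Bool.not_eq_true']
      exact ⟨j, hj.1, ⟨hfree, by rw [compareA_eq_fitsB]; exact hj.2⟩, hdfs⟩
    · rintro ⟨v, hv, hdfs⟩
      simp only [dfsA, List.any_eq_true, List.mem_range, Bool.and_eq_true, Bool.not_eq_true']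
        at hdfs
      obtain ⟨j, hjlt, ⟨hfree, hcmp⟩, hrec⟩ := hdfs
      refine ⟨v.set j true, ?_, hrec⟩
      rw [mem_stepB]
      refine ⟨v, hv, j, ?_, hfree, rfl⟩
      rw [compatB, List.mem_filter, List.mem_range]
      exact ⟨hjlt, by rw [← compareA_eq_fitsB]; exact hcmp⟩

lemma per_people (banned : List String) (people : List String) (a : Int) :
    (if (people.foldl (fun reach uid => stepB (compatB banned banned.length uid) reach)
          [List.replicate banned.length false]).isEmpty
      then a else a + 1)
    = (if dfsA banned people (List.replicate banned.length false) then a + 1 else a) := by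
  have h := reach_iff banned people [List.replicate banned.length false]
  simp only [List.mem_singleton, exists_eq_left] at h
  rw [← List.isEmpty_eq_false_iff] at h
  cases hd : dfsA banned people (List.replicate banned.length false) with
  | true => rw [h.mpr hd]; simp
  | false =>
    have hne : ¬ (List.foldl (fun re u => stepB (compatB banned banned.length u) re)
        [List.replicate banned.length false] people).isEmpty = false := fun he => by
      have := h.mp he; rw [hd] at this; exact Bool.false_ne_true this
    rw [Bool.not_eq_false] at hne
    rw [hne]; simp

lemma fold_eq (banned : List String) :
    ∀ (l : List (List String)) (a : Int),
      l.foldl (fun answer people =>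
          if (people.foldl (fun reach uid => stepB (compatB banned banned.length uid) reach)
                [List.replicate banned.length false]).isEmpty
          then answer else answer + 1) a
      = l.foldl (fun answer people =>
          if dfsA banned people (List.replicate banned.length false) then answer + 1 else answer) a := by
  intro l
  induction l with
  | nil => intro a; rfl
  | cons p ps ih =>
    intro a
    rw [List.foldl_cons, List.foldl_cons, per_people]
    exact ih _

-- ===== VERDICT (by name: the statement is the Claim_ definition above) =====
theorem solution_spec : Claim_equal_solution := by
  intro user_id banned_id _
  show solution user_id banned_id = solution_alt user_id banned_id
  unfold solution solution_alt
  simp only [pyCombinations_map, List.foldl_map]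
  exact (fold_eq banned_id (pyCombinations banned_id.length user_id) 0).symm
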